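-- pv_equiv track=rewrite | github.com/fuyu-chung/relearning-attack | clean_gt_trace.py | clean_gt_trace
-- ===== SOURCE A (Python) =====
-- def clean_gt_trace(gt_trace: str) -> str:
--     """移除 Observation，並去除重複的 Action/Action Input"""
--     lines = gt_trace.split("\n")
--
--     # 移除 Observation
--     result = []
--     skip = False
--     for line in lines:
--         if line.startswith("Observation:"):
--             skip = True
--         elif (
--             line.startswith("Thought:")
--             or line.startswith("Action:")
--             or line.startswith("Action Input:")
--             or line.startswith("Final Answer:")
--             or line == ""
--         ):
--             skip = False
--         if not skip:
--             result.append(line)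
--
--     # 去除重複的 Action/Action Input 組合
--     seen = set()
--     deduped = []
--     i = 0
--     while i < len(result):
--         line = result[i]
--         if line.startswith("Action:") and i + 1 < len(result) and result[i + 1].startswith("Action Input:"):
--             key = (line, result[i + 1])
--             if key not in seen:
--                 seen.add(key)
--                 deduped.append(line)
--                 deduped.append(result[i + 1])
--             i += 2
--         else:
--             deduped.append(line)
--             i += 1
--
--     return "\n".join(deduped).strip()
-- ===== SOURCE B (Python) =====
-- def clean_gt_trace(gt_trace: str) -> str:
--     """One fused pass: drop Observation blocks and dedupe Action/Action Input
--     pairs with a pending-Action state machine instead of index look-ahead."""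
--     output = []
--     seen = set()
--     skip = False
--     pending = None  # an "Action:" line waiting to see whether the next kept line pairs with it
--     for line in gt_trace.split("\n"):
--         if line.startswith("Observation:"):
--             skip = True
--         elif (
--             line.startswith("Thought:")
--             or line.startswith("Action:")
--             or line.startswith("Action Input:")
--             or line.startswith("Final Answer:")
--             or line == ""
--         ):
--             skip = False
--         if skip:
--             continue
--         if pending is not None:
--             if line.startswith("Action Input:"):
--                 key = (pending, line)
--                 if key not in seen:
--                     seen.add(key)
--                     output.append(pending)
--                     output.append(line)
--                 pending = None
--                 continue
--             output.append(pending)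
--             pending = None
--         if line.startswith("Action:"):
--             pending = line
--         else:
--             output.append(line)
--     if pending is not None:
--         output.append(pending)
--     return "\n".join(output).strip()
-- ===== Notes on version B (the rewrite author's own statement) =====
-- stated objective: alternative
-- what changed: Fused the two passes into one loop over the lines and replaced the index-based look-ahead dedup (while with i+=2) by a pending-Action state machine that decides each pair when the Action Input line arrives.
import Mathlib
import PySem

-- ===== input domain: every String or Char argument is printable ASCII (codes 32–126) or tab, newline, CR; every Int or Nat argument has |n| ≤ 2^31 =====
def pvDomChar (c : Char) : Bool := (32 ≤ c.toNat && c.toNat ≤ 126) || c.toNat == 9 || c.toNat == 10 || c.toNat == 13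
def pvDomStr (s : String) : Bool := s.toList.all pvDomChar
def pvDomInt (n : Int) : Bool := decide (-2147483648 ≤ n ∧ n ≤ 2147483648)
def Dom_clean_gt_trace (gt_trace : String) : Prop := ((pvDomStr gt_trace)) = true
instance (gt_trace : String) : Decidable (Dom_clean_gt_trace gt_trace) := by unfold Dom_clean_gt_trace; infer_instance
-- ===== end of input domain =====

-- One fused pass with a pending-Action state machine instead of A's two passes
-- (filter, then index look-ahead dedup); same result, not claimed faster.

-- ===== PORT A =====

-- skip update for one line (A's first loop body, shared by both ports)
def pvNewSkip (line : String) (skip : Bool) : Bool :=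
  if PySem.Str.startswith line "Observation:" then true
  else if PySem.Str.startswith line "Thought:" || PySem.Str.startswith line "Action:"
       || PySem.Str.startswith line "Action Input:" || PySem.Str.startswith line "Final Answer:"
       || line == "" then false
  else skip

-- A's first loop: remove Observation blocks, accumulating (result, skip)
def pvFilterStepA (st : List String × Bool) (line : String) : List String × Bool :=
  let skip := pvNewSkip line st.2
  (if !skip then st.1 ++ [line] else st.1, skip)

-- A's second loop: the while over indices i / i+1, as recursion on the list
def pvDedupA (seen : PySem.Set (String × String)) : List String → List String
  | [] => []
  | [l] => [l]
  | l :: l2 :: rest =>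
    if PySem.Str.startswith l "Action:" && PySem.Str.startswith l2 "Action Input:" then
      if PySem.Set.contains seen (l, l2) then pvDedupA seen rest
      else l :: l2 :: pvDedupA (PySem.Set.add seen (l, l2)) rest
    else l :: pvDedupA seen (l2 :: rest)

def clean_gt_trace (gt_trace : String) : String :=
  let lines := (PySem.Str.split? gt_trace "\n").getD []
  let result := (lines.foldl pvFilterStepA ([], false)).1
  PySem.Str.strip (PySem.Str.join "\n" (pvDedupA PySem.Set.empty result))

-- ===== PORT B =====

-- B's single loop body: state (output, seen, skip, pending)
def pvStepB (st : List String × PySem.Set (String × String) × Bool × Option String)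
    (line : String) : List String × PySem.Set (String × String) × Bool × Option String :=
  let (out, seen, skip0, pending) := st
  let skip := pvNewSkip line skip0
  if skip then (out, seen, skip, pending)
  else
    match pending with
    | some p =>
      if PySem.Str.startswith line "Action Input:" then
        if PySem.Set.contains seen (p, line) then (out, seen, skip, none)
        else (out ++ [p, line], PySem.Set.add seen (p, line), skip, none)
      else if PySem.Str.startswith line "Action:" then (out ++ [p], seen, skip, some line)
      else (out ++ [p, line], seen, skip, none)
    | none =>
      if PySem.Str.startswith line "Action:" then (out, seen, skip, some line)
      else (out ++ [line], seen, skip, none)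

def clean_gt_trace_alt (gt_trace : String) : String :=
  let st := ((PySem.Str.split? gt_trace "\n").getD []).foldl pvStepB ([], PySem.Set.empty, false, none)
  let output := match st.2.2.2 with
    | some p => st.1 ++ [p]
    | none => st.1
  PySem.Str.strip (PySem.Str.join "\n" output)

-- ===== PRECONDITION & SPEC =====
def Spec_clean_gt_trace (gt_trace : String) (out : String) : Prop := out = clean_gt_trace_alt gt_trace
instance (gt_trace : String) (out : String) : Decidable (Spec_clean_gt_trace gt_trace out) := by unfold Spec_clean_gt_trace; infer_instance

-- ===== CLAIM (what is proved, stated in full; the proofs are below) =====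
def Claim_equal_clean_gt_trace : Prop := ∀ (gt_trace : String), Dom_clean_gt_trace gt_trace → Spec_clean_gt_trace gt_trace (clean_gt_trace gt_trace)

-- ===== LEMMAS AND PROOFS =====

-- pure recursive form of A's filter pass
def pvFilt (skip : Bool) : List String → List String
  | [] => []
  | l :: ls =>
    let s := pvNewSkip l skip
    (if s then [] else [l]) ++ pvFilt s ls

-- the non-skip part of B's step, on (out, seen, pending)
def pvDStep (st : List String × PySem.Set (String × String) × Option String)
    (line : String) : List String × PySem.Set (String × String) × Option String :=
  let (out, seen, pending) := st
  match pending with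
  | some p =>
    if PySem.Str.startswith line "Action Input:" then
      if PySem.Set.contains seen (p, line) then (out, seen, none)
      else (out ++ [p, line], PySem.Set.add seen (p, line), none)
    else if PySem.Str.startswith line "Action:" then (out ++ [p], seen, some line)
    else (out ++ [p, line], seen, none)
  | none =>
    if PySem.Str.startswith line "Action:" then (out, seen, some line)
    else (out ++ [line], seen, none)

def pvFlush (st : List String × PySem.Set (String × String) × Option String) : List String :=
  match st.2.2 with
  | some p => st.1 ++ [p]
  | none => st.1

theorem pvFilterA_eq (ls : List String) (acc : List String) (skip : Bool) :
    (ls.foldl pvFilterStepA (acc, skip)).1 = acc ++ pvFilt skip ls := by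
  induction ls generalizing acc skip with
  | nil => simp [pvFilt]
  | cons l ls ih =>
    simp only [List.foldl_cons, pvFilt]
    by_cases h : pvNewSkip l skip = true
    · simp [pvFilterStepA, h, ih]
    · simp only [Bool.not_eq_true] at h
      simp [pvFilterStepA, h, ih]

theorem pvB_eq_dstep (ls : List String) (out : List String)
    (seen : PySem.Set (String × String)) (skip : Bool) (pending : Option String) :
    ((ls.foldl pvStepB (out, seen, skip, pending)).1,
     (ls.foldl pvStepB (out, seen, skip, pending)).2.1,
     (ls.foldl pvStepB (out, seen, skip, pending)).2.2.2)
      = (pvFilt skip ls).foldl pvDStep (out, seen, pending) := by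
  induction ls generalizing out seen skip pending with
  | nil => simp [pvFilt]
  | cons l ls ih =>
    simp only [List.foldl_cons, pvFilt]
    by_cases h : pvNewSkip l skip = true
    · have hstep : pvStepB (out, seen, skip, pending) l = (out, seen, pvNewSkip l skip, pending) := by
        unfold pvStepB; dsimp only; rw [if_pos h]
      rw [hstep, ih, h]
      simp
    · simp only [Bool.not_eq_true] at h
      have hstep : pvStepB (out, seen, skip, pending) l
          = ((pvDStep (out, seen, pending) l).1, (pvDStep (out, seen, pending) l).2.1,
             pvNewSkip l skip, (pvDStep (out, seen, pending) l).2.2) := by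
        unfold pvStepB pvDStep; dsimp only; rw [h]
        simp only [Bool.false_eq_true, if_false]
        cases pending <;> dsimp only <;> split <;> try split
        all_goals rfl
      rw [hstep, ih, h]
      simp only [Bool.false_eq_true, if_false, List.singleton_append, List.foldl_cons]

theorem pvDedup_eq (n : Nat) (ls : List String) (hn : ls.length ≤ n)
    (out : List String) (seen : PySem.Set (String × String)) :
    pvFlush (ls.foldl pvDStep (out, seen, none)) = out ++ pvDedupA seen ls := by
  induction n generalizing ls out seen with
  | zero =>
    have : ls = [] := List.eq_nil_of_length_eq_zero (Nat.le_zero.mp hn)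
    subst this; simp [pvFlush, pvDedupA]
  | succ n ih =>
    match ls with
    | [] => simp [pvFlush, pvDedupA]
    | l :: ls =>
      by_cases hA : PySem.Str.startswith l "Action:" = true
      · have hstep : pvDStep (out, seen, none) l = (out, seen, some l) := by
          unfold pvDStep; dsimp only; rw [if_pos hA]
        rw [List.foldl_cons, hstep]
        match ls with
        | [] => simp [pvFlush, pvDedupA]
        | l2 :: rest =>
          by_cases hI : PySem.Str.startswith l2 "Action Input:" = true
          · have hcond : (PySem.Str.startswith l "Action:"
                && PySem.Str.startswith l2 "Action Input:") = true := by rw [hA, hI]; rfl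
            by_cases hc : PySem.Set.contains seen (l, l2) = true
            · have h2 : pvDStep (out, seen, some l) l2 = (out, seen, none) := by
                unfold pvDStep; dsimp only; rw [if_pos hI, if_pos hc]
              rw [List.foldl_cons, h2,
                ih rest (by simpa using Nat.le_of_succ_le_succ (Nat.le_of_succ_le hn))]
              rw [pvDedupA, if_pos hcond, if_pos hc]
            · have h2 : pvDStep (out, seen, some l) l2
                  = (out ++ [l, l2], PySem.Set.add seen (l, l2), none) := by
                unfold pvDStep; dsimp only; rw [if_pos hI, if_neg hc]
              rw [List.foldl_cons, h2,
                ih rest (by simpa using Nat.le_of_succ_le_succ (Nat.le_of_succ_le hn))]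
              rw [pvDedupA, if_pos hcond, if_neg hc]
              simp
          · have hcond : ¬ ((PySem.Str.startswith l "Action:"
                && PySem.Str.startswith l2 "Action Input:") = true) := by
              simp only [Bool.and_eq_true, not_and]; intro _ h; exact hI h
            have h2 : pvDStep (out, seen, some l) l2 = pvDStep (out ++ [l], seen, none) l2 := by
              unfold pvDStep; dsimp only; rw [if_neg hI]; split <;> simp
            rw [List.foldl_cons, h2, ← List.foldl_cons,
              ih (l2 :: rest) (by simpa using Nat.le_of_succ_le_succ hn)]
            rw [pvDedupA, if_neg hcond]
            simp
      · have hstep : pvDStep (out, seen, none) l = (out ++ [l], seen, none) := by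
          unfold pvDStep; dsimp only; rw [if_neg hA]
        rw [List.foldl_cons, hstep, ih ls (Nat.le_of_succ_le_succ hn)]
        match ls with
        | [] => simp [pvDedupA]
        | l2 :: rest =>
          have hcond : ¬ ((PySem.Str.startswith l "Action:"
              && PySem.Str.startswith l2 "Action Input:") = true) := by
            simp only [Bool.and_eq_true, not_and]; intro h; exact absurd h hA
          rw [pvDedupA, if_neg hcond]
          simp

-- ===== VERDICT (by name: the statement is the Claim_ definition above) =====
theorem clean_gt_trace_spec : Claim_equal_clean_gt_trace := by
  intro gt _
  unfold Spec_clean_gt_trace clean_gt_trace clean_gt_trace_alt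
  set ls := (PySem.Str.split? gt "\n").getD [] with hls
  have h1 := pvFilterA_eq ls [] false
  have h2 := pvB_eq_dstep ls [] PySem.Set.empty false none
  have h3 := pvDedup_eq (pvFilt false ls).length (pvFilt false ls) le_rfl []
      PySem.Set.empty
  simp only [List.nil_append] at h1 h3
  have hmain : pvDedupA PySem.Set.empty ((ls.foldl pvFilterStepA ([], false)).1)
      = pvFlush ((ls.foldl pvStepB ([], PySem.Set.empty, false, none)).1,
          (ls.foldl pvStepB ([], PySem.Set.empty, false, none)).2.1,
          (ls.foldl pvStepB ([], PySem.Set.empty, false, none)).2.2.2) := by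
    rw [h1, h2, h3]
  dsimp only
  rw [hmain]
  rfl
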